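-- pv_equiv track=rewrite | github.com/evgenii-prusov/ado-pipeline-logs | skills/ado-pipeline-logs/scripts/ado_pipeline_logs.py | extract_error_snippet
-- ===== SOURCE A (Python) =====
-- ERROR_CONTEXT_LINES = 5     # Lines of context around each error marker
--
-- ERROR_MARKERS = [
--     "##[error]",
--     "traceback (most recent call last)",
--     "typeerror:",
--     "valueerror:",
--     "keyerror:",
--     "attributeerror:",
--     "importerror:",
--     "nameerror:",
--     "runtimeerror:",
--     "syntaxerror:",
--     "exception:",
--     "sqlcompilationerror",
--     "programmingerror",
--     "has not been processed due to errors",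
--     "failed:",
--     "error:",
-- ]
--
-- def extract_error_snippet(log_text):
--     """Scan a log for error markers and return context lines around each match.
--
--     Returns (snippet_str, has_errors). snippet_str is empty when has_errors is False.
--     """
--     if not isinstance(log_text, str):
--         return "", False
--     lines = log_text.splitlines()
--     hit_indices = set()
--     for i, line in enumerate(lines):
--         line_lower = line.lower()
--         if any(marker in line_lower for marker in ERROR_MARKERS):
--             for j in range(max(0, i - ERROR_CONTEXT_LINES),
--                            min(len(lines), i + ERROR_CONTEXT_LINES + 1)):
--                 hit_indices.add(j)
--     if not hit_indices:
--         return "", False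
--     result = []
--     prev = None
--     for idx in sorted(hit_indices):
--         if prev is not None and idx > prev + 1:
--             result.append("[...]")
--         result.append(lines[idx])
--         prev = idx
--     return "\n".join(result), True
-- ===== SOURCE B (Python) =====
-- ERROR_CONTEXT_LINES = 5
--
-- ERROR_MARKERS = [
--     "##[error]",
--     "traceback (most recent call last)",
--     "typeerror:",
--     "valueerror:",
--     "keyerror:",
--     "attributeerror:",
--     "importerror:",
--     "nameerror:",
--     "runtimeerror:",
--     "syntaxerror:",
--     "exception:",
--     "sqlcompilationerror",
--     "programmingerror",
--     "has not been processed due to errors",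
--     "failed:",
--     "error:",
-- ]
--
--
-- def extract_error_snippet(log_text):
--     """Scan a log for error markers and return context lines around each match.
--
--     Returns (snippet_str, has_errors). snippet_str is empty when has_errors is False.
--     """
--     if not isinstance(log_text, str):
--         return "", False
--     lines = log_text.splitlines()
--     n = len(lines)
--
--     def is_error(line):
--         low = line.lower()
--         return any(marker in low for marker in ERROR_MARKERS)
--
--     # keep[j]: some error line lies within ERROR_CONTEXT_LINES of line j
--     keep = [any(is_error(lines[k])
--                 for k in range(max(0, j - ERROR_CONTEXT_LINES),
--                                min(n, j + ERROR_CONTEXT_LINES + 1)))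
--             for j in range(n)]
--     if not any(keep):
--         return "", False
--     out = []
--     for j in range(n):
--         if keep[j]:
--             if out and not keep[j - 1]:
--                 out.append("[...]")
--             out.append(lines[j])
--     return "\n".join(out), True
-- ===== Notes on version B (the rewrite author's own statement) =====
-- stated objective: alternative
-- what changed: Instead of broadcasting each error line into a set of context indices and then sorting that set, B computes for each line index a local window predicate (is any error line within 5 lines?) and emits the snippet in one forward pass, inserting the ellipsis marker exactly where a kept line follows a dropped one; no set and no sort.
import Mathlib
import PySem

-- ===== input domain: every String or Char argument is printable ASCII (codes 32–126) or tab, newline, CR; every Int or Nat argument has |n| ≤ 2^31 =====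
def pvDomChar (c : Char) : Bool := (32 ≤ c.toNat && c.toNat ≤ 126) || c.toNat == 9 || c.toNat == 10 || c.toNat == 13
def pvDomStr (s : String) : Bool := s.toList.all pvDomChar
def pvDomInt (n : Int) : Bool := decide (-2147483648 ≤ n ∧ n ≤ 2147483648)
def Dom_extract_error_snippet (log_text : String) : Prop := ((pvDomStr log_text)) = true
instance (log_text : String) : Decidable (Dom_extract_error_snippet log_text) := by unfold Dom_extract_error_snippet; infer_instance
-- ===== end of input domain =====

-- B replaces A's hit-index set + sort by a per-line window predicate and a single
-- forward emission pass (objective: alternative; return values proved equal).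
-- (Python's non-str guard has no counterpart here: log_text : String.)

-- ===== PORT A =====
def ERROR_MARKERS : List String :=
  ["##[error]", "traceback (most recent call last)", "typeerror:", "valueerror:",
   "keyerror:", "attributeerror:", "importerror:", "nameerror:", "runtimeerror:",
   "syntaxerror:", "exception:", "sqlcompilationerror", "programmingerror",
   "has not been processed due to errors", "failed:", "error:"]

def extract_error_snippet (log_text : String) : String × Bool :=
  let lines := PySem.Str.splitlines log_text
  let hit_indices : PySem.Set Int :=
    (PySem.List.enumerate lines 0).foldl
      (fun s p =>
        let line_lower := PySem.Str.lower p.2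
        if ERROR_MARKERS.any (fun marker => PySem.Str.isIn marker line_lower) then
          (PySem.List.pyRange (max 0 (p.1 - 5)) (min (PySem.List.len lines) (p.1 + 5 + 1)) 1).foldl
            (fun s j => PySem.Set.add s j) s
        else s)
      PySem.Set.empty
  if hit_indices = PySem.Set.empty then ("", false)
  else
    let step := (PySem.List.sorted hit_indices (fun x => x) false).foldl
      (fun (acc : List String × Option Int) idx =>
        let result := acc.1
        let result := match acc.2 with
          | some prev => if idx > prev + 1 then result ++ ["[...]"] else result
          | none => result
        (result ++ [PySem.List.pyGetD lines idx ""], some idx))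
      ([], none)
    (PySem.Str.join "\n" step.1, true)

-- ===== PORT B =====
def bIsError (line : String) : Bool :=
  let low := PySem.Str.lower line
  ERROR_MARKERS.any (fun marker => PySem.Str.isIn marker low)

def extract_error_snippet_alt (log_text : String) : String × Bool :=
  let lines := PySem.Str.splitlines log_text
  let n := PySem.List.len lines
  let keep : List Bool :=
    (PySem.List.pyRange 0 n 1).map (fun j =>
      (PySem.List.pyRange (max 0 (j - 5)) (min n (j + 5 + 1)) 1).any
        (fun k => bIsError (PySem.List.pyGetD lines k "")))
  if !keep.any id then ("", false)
  else
    let out := (PySem.List.pyRange 0 n 1).foldl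
      (fun (out : List String) j =>
        if PySem.List.pyGetD keep j false then
          let out :=
            if out ≠ [] ∧ PySem.List.pyGetD keep (j - 1) true = false then
              out ++ ["[...]"]
            else out
          out ++ [PySem.List.pyGetD lines j ""]
        else out) []
    (PySem.Str.join "\n" out, true)

-- ===== PRECONDITION & SPEC =====
def Spec_extract_error_snippet (log_text : String) (out : String × Bool) : Prop := out = extract_error_snippet_alt log_text
instance (log_text : String) (out : String × Bool) : Decidable (Spec_extract_error_snippet log_text out) := by unfold Spec_extract_error_snippet; infer_instance

-- ===== CLAIM (what is proved, stated in full; the proofs are below) =====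
def Claim_equal_extract_error_snippet : Prop := ∀ (log_text : String), Dom_extract_error_snippet log_text → Spec_extract_error_snippet log_text (extract_error_snippet log_text)

-- ===== LEMMAS AND PROOFS =====

-- Proof-only helpers: named copies of the two port cores and of their loop bodies.

def pvWindow (lines : List String) (i : Int) : List Int :=
  PySem.List.pyRange (max 0 (i - 5)) (min (PySem.List.len lines) (i + 5 + 1)) 1

def pvHits (lines : List String) : PySem.Set Int :=
  (PySem.List.enumerate lines 0).foldl
    (fun s p =>
      if bIsError p.2 then
        (pvWindow lines p.1).foldl (fun s j => PySem.Set.add s j) s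
      else s)
    PySem.Set.empty

def pvAStep (lines : List String) (acc : List String × Option Int) (idx : Int) :
    List String × Option Int :=
  let result := acc.1
  let result := match acc.2 with
    | some prev => if idx > prev + 1 then result ++ ["[...]"] else result
    | none => result
  (result ++ [PySem.List.pyGetD lines idx ""], some idx)

def pvFKeep (lines : List String) (j : Int) : Bool :=
  (pvWindow lines j).any (fun k => bIsError (PySem.List.pyGetD lines k ""))

def pvKeep (lines : List String) : List Bool :=
  (PySem.List.pyRange 0 (PySem.List.len lines) 1).map (fun j => pvFKeep lines j)

def pvBStep (lines : List String) (out : List String) (j : Int) : List String :=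
  if PySem.List.pyGetD (pvKeep lines) j false then
    let out :=
      if out ≠ [] ∧ PySem.List.pyGetD (pvKeep lines) (j - 1) true = false then
        out ++ ["[...]"]
      else out
    out ++ [PySem.List.pyGetD lines j ""]
  else out

def pvCoreA (lines : List String) : String × Bool :=
  if pvHits lines = PySem.Set.empty then ("", false)
  else
    let step := (PySem.List.sorted (pvHits lines) (fun x => x) false).foldl (pvAStep lines) ([], none)
    (PySem.Str.join "\n" step.1, true)

def pvCoreB (lines : List String) : String × Bool :=
  if !(pvKeep lines).any id then ("", false)
  else
    (PySem.Str.join "\n" ((PySem.List.pyRange 0 (PySem.List.len lines) 1).foldl (pvBStep lines) []), true)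

lemma portA_eq (lt : String) :
    extract_error_snippet lt = pvCoreA (PySem.Str.splitlines lt) := rfl

lemma portB_eq (lt : String) :
    extract_error_snippet_alt lt = pvCoreB (PySem.Str.splitlines lt) := rfl

def pvKept (lines : List String) : List Int :=
  (PySem.List.pyRange 0 (PySem.List.len lines) 1).filter (fun j => pvFKeep lines j)

def pvA (lines : List String) (m : Int) : List String × Option Int :=
  ((PySem.List.pyRange 0 m 1).filter (fun j => pvFKeep lines j)).foldl (pvAStep lines) ([], none)

def pvB (lines : List String) (m : Int) : List String :=
  (PySem.List.pyRange 0 m 1).foldl (pvBStep lines) []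

lemma mem_pvWindow (lines : List String) (i x : Int) :
    x ∈ pvWindow lines i ↔ max 0 (i - 5) ≤ x ∧ x < min (lines.length : Int) (i + 5 + 1) := by
  simp [pvWindow, PySem.List.mem_pyRange_one]

lemma mem_foldl_hits (lines : List String) (l : List (Int × String)) (s : PySem.Set Int) (x : Int) :
    x ∈ l.foldl
      (fun s p =>
        if bIsError p.2 then (pvWindow lines p.1).foldl (fun s j => PySem.Set.add s j) s else s) s
    ↔ x ∈ s ∨ ∃ p ∈ l, bIsError p.2 = true ∧ x ∈ pvWindow lines p.1 := by
  induction l generalizing s with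
  | nil => simp
  | cons p l ih =>
    rw [List.foldl_cons]
    by_cases hp : bIsError p.2 = true
    · rw [if_pos hp, ih]
      have hmem : x ∈ (pvWindow lines p.1).foldl (fun s j => PySem.Set.add s j) s
          ↔ x ∈ s ∨ ∃ b ∈ pvWindow lines p.1, x = b := by
        simpa using PySem.Set.mem_foldl_add (l := pvWindow lines p.1) (s := s)
          (f := fun (j : Int) => j) (y := x)
      rw [hmem]
      constructor
      · rintro ((hs | ⟨b, hb, rfl⟩) | ⟨q, hq, h1, h2⟩)
        · exact Or.inl hs
        · exact Or.inr ⟨p, List.mem_cons_self .., hp, hb⟩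
        · exact Or.inr ⟨q, List.mem_cons_of_mem _ hq, h1, h2⟩
      · rintro (hs | ⟨q, hq, h1, h2⟩)
        · exact Or.inl (Or.inl hs)
        · rcases List.mem_cons.1 hq with rfl | hq'
          · exact Or.inl (Or.inr ⟨x, h2, rfl⟩)
          · exact Or.inr ⟨q, hq', h1, h2⟩
    · rw [if_neg hp, ih]
      constructor
      · rintro (hs | ⟨q, hq, h1, h2⟩)
        · exact Or.inl hs
        · exact Or.inr ⟨q, List.mem_cons_of_mem _ hq, h1, h2⟩
      · rintro (hs | ⟨q, hq, h1, h2⟩)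
        · exact Or.inl hs
        · rcases List.mem_cons.1 hq with rfl | hq'
          · exact absurd h1 hp
          · exact Or.inr ⟨q, hq', h1, h2⟩

lemma nodup_foldl_add (l : List Int) (s : PySem.Set Int) (h : s.Nodup) :
    (l.foldl (fun s j => PySem.Set.add s j) s).Nodup := by
  induction l generalizing s with
  | nil => exact h
  | cons b l ih => exact ih _ (PySem.Set.nodup_add _ _ h)

lemma nodup_pvHits (lines : List String) : (pvHits lines).Nodup := by
  unfold pvHits
  generalize (PySem.List.enumerate lines 0) = l
  have : (PySem.Set.empty : PySem.Set Int).Nodup := List.nodup_nil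
  generalize (PySem.Set.empty : PySem.Set Int) = s at this ⊢
  induction l generalizing s with
  | nil => exact this
  | cons p l ih =>
    rw [List.foldl_cons]
    split
    · exact ih _ (nodup_foldl_add _ _ this)
    · exact ih _ this

lemma mem_pvHits (lines : List String) (x : Int) :
    x ∈ pvHits lines ↔
      ∃ k : Nat, ∃ h : k < lines.length, bIsError lines[k] = true ∧ x ∈ pvWindow lines k := by
  unfold pvHits
  rw [mem_foldl_hits]
  simp only [PySem.Set.empty, List.not_mem_nil, false_or]
  constructor
  · rintro ⟨p, hp, h1, h2⟩
    rcases (PySem.List.mem_enumerate_iff lines 0 p).1 hp with ⟨k, hk, rfl⟩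
    exact ⟨k, hk, by simpa using h1, by simpa using h2⟩
  · rintro ⟨k, hk, h1, h2⟩
    exact ⟨((k : Int), lines[k]), (PySem.List.mem_enumerate_iff lines 0 _).2 ⟨k, hk, by simp⟩, h1, h2⟩

lemma pvFKeep_iff (lines : List String) (x : Int) (hx : 0 ≤ x) (hx' : x < (lines.length : Int)) :
    pvFKeep lines x = true ↔
      ∃ k : Nat, ∃ h : k < lines.length, bIsError lines[k] = true ∧ x ∈ pvWindow lines k := by
  unfold pvFKeep
  rw [List.any_eq_true]
  constructor
  · rintro ⟨kk, hkk, herr⟩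
    rw [mem_pvWindow] at hkk
    have h0 : 0 ≤ kk := le_trans (le_max_left 0 _) hkk.1
    have h1 : kk < (lines.length : Int) := lt_of_lt_of_le hkk.2 (min_le_left _ _)
    have hget : PySem.List.pyGetD lines kk "" = lines[kk.toNat] :=
      PySem.List.pyGetD_eq_getElem (xs := lines) (i := kk) (d := "") h0 (by simpa using h1)
    refine ⟨kk.toNat, by omega, by rwa [hget] at herr, ?_⟩
    rw [mem_pvWindow]
    omega
  · rintro ⟨k, hk, herr, hxw⟩
    rw [mem_pvWindow] at hxw
    refine ⟨(k : Int), ?_, ?_⟩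
    · rw [mem_pvWindow]
      omega
    · have hget : PySem.List.pyGetD lines (k : Int) "" = lines[k] := by
        have := PySem.List.pyGetD_eq_getElem (xs := lines) (i := (k : Int)) (d := "")
          (by positivity) (by simpa using hk)
        simpa using this
      rwa [hget]

lemma mem_pvHits_iff_keep (lines : List String) (x : Int) :
    x ∈ pvHits lines ↔ 0 ≤ x ∧ x < (lines.length : Int) ∧ pvFKeep lines x = true := by
  rw [mem_pvHits]
  constructor
  · rintro ⟨k, hk, herr, hxw⟩
    have hb := (mem_pvWindow lines k x).1 hxw
    have h0 : 0 ≤ x := le_trans (le_max_left 0 _) hb.1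
    have h1 : x < (lines.length : Int) := lt_of_lt_of_le hb.2 (min_le_left _ _)
    exact ⟨h0, h1, (pvFKeep_iff lines x h0 h1).2 ⟨k, hk, herr, hxw⟩⟩
  · rintro ⟨h0, h1, hf⟩
    exact (pvFKeep_iff lines x h0 h1).1 hf

lemma mem_pvKept (lines : List String) (x : Int) :
    x ∈ pvKept lines ↔ 0 ≤ x ∧ x < (lines.length : Int) ∧ pvFKeep lines x = true := by
  simp [pvKept, List.mem_filter, PySem.List.mem_pyRange_one, and_assoc]

lemma sorted_pvHits (lines : List String) :
    PySem.List.sorted (pvHits lines) (fun x => x) false = pvKept lines := by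
  apply PySem.List.sorted_eq_of_perm_of_pairwise_lt
  · exact (List.perm_ext_iff_of_nodup
      (List.Nodup.filter _ (PySem.List.nodup_pyRange_one _ _)) (nodup_pvHits lines)).2
      (fun a => (mem_pvKept lines a).trans (mem_pvHits_iff_keep lines a).symm)
  · exact List.Pairwise.filter _ (PySem.List.pairwise_lt_pyRange_one _ _)

lemma hits_empty_iff (lines : List String) :
    pvHits lines = PySem.Set.empty ↔ (pvKeep lines).any id = false := by
  have hiff : (pvKeep lines).any id = true ↔ ∃ x : Int, x ∈ pvHits lines := by
    simp only [pvKeep, List.any_eq_true, List.mem_map]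
    constructor
    · rintro ⟨b, ⟨j, hj, rfl⟩, hb⟩
      rw [PySem.List.mem_pyRange_one] at hj
      exact ⟨j, (mem_pvHits_iff_keep lines j).2 ⟨hj.1, by simpa using hj.2, by simpa using hb⟩⟩
    · rintro ⟨x, hx⟩
      rcases (mem_pvHits_iff_keep lines x).1 hx with ⟨h0, h1, hf⟩
      exact ⟨pvFKeep lines x,
        ⟨x, by rw [PySem.List.mem_pyRange_one]; exact ⟨h0, by simpa using h1⟩, rfl⟩, hf⟩
  constructor
  · intro h
    cases hb : (pvKeep lines).any id with
    | false => rfl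
    | true =>
      rcases hiff.1 hb with ⟨x, hx⟩
      rw [h] at hx
      simp [PySem.Set.empty] at hx
  · intro h
    rw [show (PySem.Set.empty : PySem.Set Int) = ([] : List Int) from rfl,
      List.eq_nil_iff_forall_not_mem]
    intro x hx
    have : (pvKeep lines).any id = true := hiff.2 ⟨x, hx⟩
    rw [h] at this
    exact Bool.noConfusion this

lemma pyGetD_pvKeep (lines : List String) (j : Int) (d : Bool)
    (h0 : 0 ≤ j) (h1 : j < (lines.length : Int)) :
    PySem.List.pyGetD (pvKeep lines) j d = pvFKeep lines j := by
  unfold pvKeep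
  have := PySem.List.pyGetD_map_pyRange_of_nonneg (f := fun j => pvFKeep lines j)
    (n := PySem.List.len lines) (i := j) (d := d) h0 (by simpa using h1)
  simpa using this

lemma emit_inv (lines : List String) (m : Nat) (hm : m ≤ lines.length) :
    pvB lines m = (pvA lines m).1 ∧
    ((pvA lines m).2 = none →
      (pvA lines m).1 = [] ∧ ∀ q : Int, 0 ≤ q → q < m → pvFKeep lines q = false) ∧
    (∀ p : Int, (pvA lines m).2 = some p →
      (pvA lines m).1 ≠ [] ∧ 0 ≤ p ∧ p < m ∧ pvFKeep lines p = true ∧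
        ∀ q : Int, p < q → q < m → pvFKeep lines q = false) := by
  induction m with
  | zero =>
    have hr : PySem.List.pyRange 0 ((0 : Nat) : Int) 1 = [] :=
      PySem.List.pyRange_one_eq_nil (by simp)
    refine ⟨?_, ?_, ?_⟩
    · simp [pvA, pvB]
    · intro _
      refine ⟨by simp [pvA], fun q h0 h1 => ?_⟩
      exfalso; push_cast at h1; omega
    · intro p hp
      simp [pvA] at hp
  | succ m ih =>
    have hmlt : (m : Int) < (lines.length : Int) := by exact_mod_cast hm
    have hm' : m ≤ lines.length := Nat.le_of_succ_le hm
    obtain ⟨ihB, ihN, ihS⟩ := ih hm'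
    have hr : PySem.List.pyRange 0 (((m + 1 : Nat)) : Int) 1
        = PySem.List.pyRange 0 (m : Int) 1 ++ [(m : Int)] := by
      have h := PySem.List.pyRange_one_succ_right (a := (0 : Int)) (b := (m : Int)) (by positivity)
      have hc : (((m + 1 : Nat)) : Int) = (m : Int) + 1 := by push_cast; ring
      rw [hc, h]
    have hkeepm : PySem.List.pyGetD (pvKeep lines) (m : Int) false = pvFKeep lines (m : Int) :=
      pyGetD_pvKeep lines _ _ (by positivity) hmlt
    by_cases hk : pvFKeep lines (m : Int) = true
    case neg =>
      have hkf : pvFKeep lines (m : Int) = false := by simpa using hk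
      have hA : pvA lines ((m + 1 : Nat) : Int) = pvA lines (m : Int) := by
        unfold pvA
        rw [hr, List.filter_append, List.foldl_append]
        simp [hkf]
      have hB : pvB lines ((m + 1 : Nat) : Int) = pvB lines (m : Int) := by
        unfold pvB
        rw [hr, List.foldl_append]
        simp [pvBStep, hkeepm, hkf]
      rw [hA, hB]
      refine ⟨ihB, ?_, ?_⟩
      · intro hnone
        obtain ⟨h1, h2⟩ := ihN hnone
        refine ⟨h1, fun q hq0 hq1 => ?_⟩
        by_cases hqm : q < (m : Int)
        · exact h2 q hq0 hqm
        · have hq : q = (m : Int) := by push_cast at hq1; omega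
          rw [hq]; exact hkf
      · intro p hp
        obtain ⟨h1, h2, h3, h4, h5⟩ := ihS p hp
        refine ⟨h1, h2, by push_cast; omega, h4, fun q hq0 hq1 => ?_⟩
        by_cases hqm : q < (m : Int)
        · exact h5 q hq0 hqm
        · have hq : q = (m : Int) := by push_cast at hq1; omega
          rw [hq]; exact hkf
    case pos =>
      have hA : pvA lines ((m + 1 : Nat) : Int) = pvAStep lines (pvA lines (m : Int)) (m : Int) := by
        unfold pvA
        rw [hr, List.filter_append, List.foldl_append]
        simp [hk]
      have hB : pvB lines ((m + 1 : Nat) : Int) = pvBStep lines (pvB lines (m : Int)) (m : Int) := by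
        unfold pvB
        rw [hr, List.foldl_append]
        simp
      rw [hA, hB]
      cases hA2 : (pvA lines (m : Int)).2 with
      | none =>
        obtain ⟨h1, h2⟩ := ihN hA2
        have hBm : pvB lines (m : Int) = [] := by rw [ihB, h1]
        have hstepB : pvBStep lines (pvB lines (m : Int)) (m : Int)
            = [] ++ [PySem.List.pyGetD lines (m : Int) ""] := by
          rw [hBm]
          simp [pvBStep, hkeepm, hk]
        have hstepA : pvAStep lines (pvA lines (m : Int)) (m : Int)
            = ([] ++ [PySem.List.pyGetD lines (m : Int) ""], some (m : Int)) := by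
          simp [pvAStep, hA2, h1]
        rw [hstepA, hstepB]
        refine ⟨rfl, by intro h; simp at h, ?_⟩
        intro p hp
        simp only [Option.some.injEq] at hp
        subst hp
        refine ⟨by simp, by positivity, by push_cast; omega, hk, fun q hq0 hq1 => ?_⟩
        exfalso; push_cast at hq1; omega
      | some p =>
        obtain ⟨h1, h2, h3, h4, h5⟩ := ihS p hA2
        have hm1 : (0 : Int) ≤ (m : Int) - 1 := by omega
        have hm1' : (m : Int) - 1 < (lines.length : Int) := by omega
        have hkeepm1 : PySem.List.pyGetD (pvKeep lines) ((m : Int) - 1) true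
            = pvFKeep lines ((m : Int) - 1) := pyGetD_pvKeep lines _ _ hm1 hm1'
        have hBne : pvB lines (m : Int) ≠ [] := by rw [ihB]; exact h1
        have hiff : ((m : Int) > p + 1) ↔ pvFKeep lines ((m : Int) - 1) = false := by
          constructor
          · intro hgt
            exact h5 _ (by omega) (by omega)
          · intro hf
            by_contra hle
            have hpm : p = (m : Int) - 1 := by omega
            rw [← hpm, h4] at hf
            exact Bool.noConfusion hf
        have hstepA : pvAStep lines (pvA lines (m : Int)) (m : Int)
            = ((if (m : Int) > p + 1 then (pvA lines (m : Int)).1 ++ ["[...]"]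
                else (pvA lines (m : Int)).1)
               ++ [PySem.List.pyGetD lines (m : Int) ""], some (m : Int)) := by
          simp [pvAStep, hA2]
        have hstepB : pvBStep lines (pvB lines (m : Int)) (m : Int)
            = (if (m : Int) > p + 1 then (pvA lines (m : Int)).1 ++ ["[...]"]
               else (pvA lines (m : Int)).1)
              ++ [PySem.List.pyGetD lines (m : Int) ""] := by
          unfold pvBStep
          rw [hkeepm, if_pos hk, hkeepm1, ihB]
          by_cases hgt : (m : Int) > p + 1
          · rw [if_pos ⟨h1, hiff.1 hgt⟩, if_pos hgt]
          · rw [if_neg (fun hc => hgt (hiff.2 hc.2)), if_neg hgt]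
        rw [hstepA, hstepB]
        refine ⟨rfl, by intro h; simp at h, ?_⟩
        intro p' hp'
        simp only [Option.some.injEq] at hp'
        subst hp'
        refine ⟨by simp, by positivity, by push_cast; omega, hk, fun q hq0 hq1 => ?_⟩
        exfalso; push_cast at hq1; omega

lemma core_eq (lines : List String) : pvCoreA lines = pvCoreB lines := by
  unfold pvCoreA pvCoreB
  by_cases h : pvHits lines = PySem.Set.empty
  · rw [if_pos h]
    have hany := (hits_empty_iff lines).1 h
    simp [hany]
  · rw [if_neg h]
    have hany : (pvKeep lines).any id = true := by
      cases hb : (pvKeep lines).any id with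
      | false => exact absurd ((hits_empty_iff lines).2 hb) h
      | true => rfl
    simp only [hany, Bool.not_true, Bool.false_eq_true, if_false]
    have hemit := (emit_inv lines lines.length le_rfl).1
    unfold pvA pvB at hemit
    rw [sorted_pvHits]
    have hlen : PySem.List.pyRange 0 (PySem.List.len lines) 1
        = PySem.List.pyRange 0 ((lines.length : Int)) 1 := by simp
    have hkept : pvKept lines
        = (PySem.List.pyRange 0 ((lines.length : Int)) 1).filter (fun j => pvFKeep lines j) := by
      rw [pvKept, hlen]
    rw [hkept, hlen, ← hemit]


-- ===== VERDICT (by name: the statement is the Claim_ definition above) =====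
theorem extract_error_snippet_spec : Claim_equal_extract_error_snippet := by
  intro lt _
  show extract_error_snippet lt = extract_error_snippet_alt lt
  rw [portA_eq, portB_eq, core_eq]
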